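-- pv_equiv track=rewrite | github.com/matijapretnar/programiranje-1 | 13-dinamicno-programiranje/predavanja/krcenje.py | energije_vrstice
-- ===== SOURCE A (Python) =====
-- def razdalja(piksel1, piksel2):
--     r1, g1, b1 = piksel1
--     r2, g2, b2 = piksel2
--     return abs(r1 - r2) + abs(g1 - g2) + abs(b1 - b2)
--
-- def energije_vrstice(vrstica):
--     sirina = len(vrstica)
--     energije = [0] * sirina
--     for i in range(sirina - 1):
--         r = razdalja(vrstica[i], vrstica[i + 1])
--         energije[i] += r
--         energije[i + 1] += r
--     energije[0] *= 2
--     energije[-1] *= 2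
--     return energije
-- ===== SOURCE B (Python) =====
-- def razdalja(piksel1, piksel2):
--     r1, g1, b1 = piksel1
--     r2, g2, b2 = piksel2
--     return abs(r1 - r2) + abs(g1 - g2) + abs(b1 - b2)
--
-- def energije_vrstice(vrstica):
--     n = len(vrstica)
--     # prefix sums of the adjacent distances: S[k] = d[0] + ... + d[k-1]
--     S = [0]
--     for a, b in zip(vrstica, vrstica[1:]):
--         S.append(S[-1] + razdalja(a, b))
--     # each energy is a difference of two prefix sums (clamped at the ends)
--     energije = [S[min(i + 1, n - 1)] - S[max(i - 1, 0)] for i in range(n)]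
--     energije[0] *= 2
--     energije[-1] *= 2
--     return energije
-- ===== Notes on version B (the rewrite author's own statement) =====
-- stated objective: alternative
-- what changed: A scatters each edge distance into a mutated accumulator array (energije[i] += r; energije[i+1] += r); B instead builds the running prefix sums of the adjacent distances and obtains each pixel's energy as a difference of two clamped prefix sums, then applies the same endpoint doubling.
import Mathlib
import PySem

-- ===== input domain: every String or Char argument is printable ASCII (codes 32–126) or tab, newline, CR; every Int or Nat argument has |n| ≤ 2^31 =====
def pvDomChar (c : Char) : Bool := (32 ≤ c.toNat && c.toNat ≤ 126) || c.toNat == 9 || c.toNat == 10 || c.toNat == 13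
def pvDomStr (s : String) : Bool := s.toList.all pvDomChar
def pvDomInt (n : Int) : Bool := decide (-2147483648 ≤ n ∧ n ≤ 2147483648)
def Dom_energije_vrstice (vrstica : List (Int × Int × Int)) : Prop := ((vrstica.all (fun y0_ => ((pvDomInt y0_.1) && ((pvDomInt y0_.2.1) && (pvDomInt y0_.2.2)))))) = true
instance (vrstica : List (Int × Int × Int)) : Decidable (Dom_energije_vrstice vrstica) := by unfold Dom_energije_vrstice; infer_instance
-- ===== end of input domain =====

-- B replaces A's edge-scatter accumulation by prefix sums of the adjacent distances,
-- reading each energy as a difference of two clamped prefix sums (objective: alternative,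
-- same linear cost). Both raise IndexError on the empty row, excluded by Pre_.

-- ===== PORT A =====
def razdalja (piksel1 piksel2 : Int × Int × Int) : Int :=
  |piksel1.1 - piksel2.1| + |piksel1.2.1 - piksel2.2.1| + |piksel1.2.2 - piksel2.2.2|

def energije_vrstice (vrstica : List (Int × Int × Int)) : List Int :=
  let sirina := vrstica.length
  let energije := List.replicate sirina (0 : Int)
  let energije := (List.range (sirina - 1)).foldl
    (fun e i =>
      let r := razdalja (vrstica.getD i (0, 0, 0)) (vrstica.getD (i + 1) (0, 0, 0))
      let e := e.set i (e.getD i 0 + r)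
      e.set (i + 1) (e.getD (i + 1) 0 + r)) energije
  -- energije[0] *= 2; energije[-1] *= 2 (indices valid under Pre_: vrstica ≠ [])
  let energije := energije.set 0 (energije.getD 0 0 * 2)
  energije.set (sirina - 1) (energije.getD (sirina - 1) 0 * 2)

-- ===== PORT B =====
def energije_vrstice_alt (vrstica : List (Int × Int × Int)) : List Int :=
  let n := vrstica.length
  -- S = [0]; for a, b in zip(vrstica, vrstica[1:]): S.append(S[-1] + razdalja(a, b))
  let S := (vrstica.zip (vrstica.drop 1)).foldl
    (fun S p => S ++ [S.getLast?.getD 0 + razdalja p.1 p.2]) [0]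
  -- energije = [S[min(i+1, n-1)] - S[max(i-1, 0)] for i in range(n)]
  let energije := (List.range n).map
    (fun i => S.getD (min (i + 1) (n - 1)) 0 - S.getD (max (i - 1) 0) 0)
  -- energije[0] *= 2; energije[-1] *= 2
  let energije := energije.set 0 (energije.getD 0 0 * 2)
  energije.set (n - 1) (energije.getD (n - 1) 0 * 2)

-- ===== PRECONDITION & SPEC =====
-- Both Pythons raise IndexError at `energije[0] *= 2` on the empty list; Pre_ excludes exactly that input.
def Pre_energije_vrstice (vrstica : List (Int × Int × Int)) : Prop := vrstica ≠ []
instance (vrstica : List (Int × Int × Int)) : Decidable (Pre_energije_vrstice vrstica) := by unfold Pre_energije_vrstice; infer_instance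
def pvWitness_energije_vrstice : (List (Int × Int × Int)) := [(1, 2, 3), (4, 0, 2)]

def Spec_energije_vrstice (vrstica : List (Int × Int × Int)) (out : List Int) : Prop := out = energije_vrstice_alt vrstica
instance (vrstica : List (Int × Int × Int)) (out : List Int) : Decidable (Spec_energije_vrstice vrstica out) := by unfold Spec_energije_vrstice; infer_instance

-- ===== CLAIM =====
def Claim_equal_energije_vrstice : Prop := ∀ (vrstica : List (Int × Int × Int)), Dom_energije_vrstice vrstica → Pre_energije_vrstice vrstica → Spec_energije_vrstice vrstica (energije_vrstice vrstica)

-- ===== LEMMAS AND PROOFS =====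

-- distance across edge i of the row
def pvDist (vrstica : List (Int × Int × Int)) (i : Nat) : Int :=
  razdalja (vrstica.getD i (0, 0, 0)) (vrstica.getD (i + 1) (0, 0, 0))

-- A's loop body, named so the rewrite patterns stay stable
def pvStep (vrstica : List (Int × Int × Int)) (e : List Int) (i : Nat) : List Int :=
  let r := razdalja (vrstica.getD i (0, 0, 0)) (vrstica.getD (i + 1) (0, 0, 0))
  let e := e.set i (e.getD i 0 + r)
  e.set (i + 1) (e.getD (i + 1) 0 + r)

-- A's accumulator after the full loop
def pvFold (vrstica : List (Int × Int × Int)) (k : Nat) : List Int :=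
  (List.range k).foldl (pvStep vrstica) (List.replicate vrstica.length (0 : Int))

-- value of A's accumulator at index j after the first k loop iterations
def pvAcc (vrstica : List (Int × Int × Int)) (k j : Nat) : Int :=
  (if 1 ≤ j ∧ j ≤ k then pvDist vrstica (j - 1) else 0) +
  (if j < k then pvDist vrstica j else 0)

-- prefix sums of the adjacent distances (B's table, abstractly)
def pvPre (vrstica : List (Int × Int × Int)) : Nat → Int
  | 0 => 0
  | k + 1 => pvPre vrstica k + pvDist vrstica k

lemma pv_A_eq (vrstica : List (Int × Int × Int)) :
    energije_vrstice vrstica =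
      ((pvFold vrstica (vrstica.length - 1)).set 0
          ((pvFold vrstica (vrstica.length - 1)).getD 0 0 * 2)).set (vrstica.length - 1)
        (((pvFold vrstica (vrstica.length - 1)).set 0
          ((pvFold vrstica (vrstica.length - 1)).getD 0 0 * 2)).getD (vrstica.length - 1) 0 * 2) := rfl

lemma pv_getD_set (l : List Int) (i j : Nat) (a : Int) :
    (l.set i a).getD j 0 = if j = i ∧ i < l.length then a else l.getD j 0 := by
  simp only [List.getD, List.getElem?_set]
  rcases eq_or_ne i j with h | h
  · subst h
    by_cases hi : i < l.length <;> simp [hi]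
  · rw [if_neg h, if_neg (fun hc => h hc.1.symm)]

lemma pv_len_step (vrstica : List (Int × Int × Int)) (e : List Int) (i : Nat) :
    (pvStep vrstica e i).length = e.length := by
  simp [pvStep]

lemma pv_len_foldl (vrstica : List (Int × Int × Int)) (e : List Int) (r : List Nat) :
    (r.foldl (pvStep vrstica) e).length = e.length := by
  induction r generalizing e with
  | nil => rfl
  | cons a t ih => rw [List.foldl_cons, ih, pv_len_step]

lemma pv_len_fold (vrstica : List (Int × Int × Int)) (k : Nat) :
    (pvFold vrstica k).length = vrstica.length := by
  unfold pvFold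
  rw [pv_len_foldl, List.length_replicate]

lemma pv_getD_step (vrstica : List (Int × Int × Int)) (e : List Int) (i j : Nat)
    (hi : i + 1 < e.length) :
    (pvStep vrstica e i).getD j 0 =
      if j = i then e.getD i 0 + pvDist vrstica i
      else if j = i + 1 then e.getD (i + 1) 0 + pvDist vrstica i
      else e.getD j 0 := by
  simp only [pvStep, pvDist]
  by_cases h2 : j = i + 1
  · subst h2
    rw [pv_getD_set, if_pos ⟨rfl, by simpa using hi⟩,
        pv_getD_set, if_neg (by omega), if_neg (by omega), if_pos rfl]
  · rw [pv_getD_set, if_neg (by omega), pv_getD_set]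
    by_cases h1 : j = i
    · subst h1
      rw [if_pos ⟨rfl, by omega⟩, if_pos rfl]
    · rw [if_neg (by omega), if_neg h1, if_neg h2]

lemma pv_acc_invariant (vrstica : List (Int × Int × Int)) (k : Nat)
    (hk : k ≤ vrstica.length - 1) :
    ∀ j, (pvFold vrstica k).getD j 0 = pvAcc vrstica k j := by
  induction k with
  | zero =>
    intro j
    unfold pvFold
    by_cases h : j < vrstica.length <;>
      simp [pvAcc, List.getD, h] <;>
      (intro h1 h2; exact absurd h2 (by omega))
  | succ k ih =>
    intro j
    have hk' : k ≤ vrstica.length - 1 := Nat.le_of_succ_le hk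
    have hkn : k + 1 < vrstica.length := by
      rcases vrstica with _ | ⟨a, t⟩
      · omega
      · simp at hk ⊢; omega
    have hfold : pvFold vrstica (k + 1) = pvStep vrstica (pvFold vrstica k) k := by
      unfold pvFold
      rw [List.range_succ, List.foldl_append, List.foldl_cons, List.foldl_nil]
    rw [hfold, pv_getD_step vrstica _ k j (by rw [pv_len_fold]; omega),
        ih hk', ih hk', ih hk']
    by_cases h1 : j = k
    · subst h1
      rw [if_pos rfl]
      simp only [pvAcc]
      split_ifs <;> omega
    · by_cases h2 : j = k + 1
      · subst h2
        rw [if_neg h1, if_pos rfl]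
        simp only [pvAcc, Nat.add_sub_cancel]
        split_ifs <;> omega
      · rw [if_neg h1, if_neg h2]
        simp only [pvAcc]
        split_ifs <;> omega

-- B's prefix-sum fold, characterized: it is the map of partial sums over range (len+1)
lemma pv_fold_S (l : List ((Int × Int × Int) × (Int × Int × Int))) :
    l.foldl (fun S p => S ++ [S.getLast?.getD 0 + razdalja p.1 p.2]) [0] =
      (List.range (l.length + 1)).map
        (fun k => ((l.take k).map (fun p => razdalja p.1 p.2)).sum) := by
  induction l using List.reverseRecOn with
  | nil => simp
  | append_singleton l a ih =>
    have hlast : ((List.range (l.length + 1)).map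
        (fun k => ((l.take k).map (fun p => razdalja p.1 p.2)).sum)).getLast?.getD 0 =
        (l.map (fun p => razdalja p.1 p.2)).sum := by
      rw [List.range_succ, List.map_append, List.map_singleton, List.getLast?_concat,
          Option.getD_some, List.take_length]
    rw [List.foldl_append, List.foldl_cons, List.foldl_nil, ih, hlast]
    have hlen : (l ++ [a]).length + 1 = (l.length + 1) + 1 := by simp
    conv_rhs => rw [hlen, List.range_succ, List.map_append, List.map_singleton]
    congr 1
    · apply List.map_congr_left
      intro k hk
      rw [List.mem_range] at hk
      rw [List.take_append_of_le_length (by omega)]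
    · congr 1
      rw [List.take_of_length_le (by simp), List.map_append, List.sum_append,
          List.map_singleton, List.sum_singleton]

-- partial sums of the zipped distances are pvPre
lemma pv_take_sum (vrstica : List (Int × Int × Int)) (k : Nat)
    (hk : k ≤ vrstica.length - 1) :
    (((vrstica.zip (vrstica.drop 1)).take k).map (fun p => razdalja p.1 p.2)).sum =
      pvPre vrstica k := by
  induction k with
  | zero => simp [pvPre]
  | succ k ih =>
    have hz : (vrstica.zip (vrstica.drop 1)).length = vrstica.length - 1 := by
      rw [List.length_zip, List.length_drop]; omega
    have hkz : k < (vrstica.zip (vrstica.drop 1)).length := by omega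
    rw [List.take_succ, List.getElem?_eq_getElem hkz]
    rw [List.map_append, List.sum_append, ih (by omega)]
    simp only [Option.toList_some, List.map_singleton, List.sum_singleton]
    have hget : (vrstica.zip (vrstica.drop 1))[k] =
        (vrstica[k]'(by omega), vrstica[k + 1]'(by omega)) := by
      simp [List.getElem_zip, List.getElem_drop, Nat.add_comm 1 k]
    rw [hget, pvPre]
    congr 1
    simp [pvDist, List.getD, List.getElem?_eq_getElem (show k < vrstica.length by omega),
      List.getElem?_eq_getElem (show k + 1 < vrstica.length by omega)]

-- B's prefix-sum table and per-pixel read, named (definitionally those of the port)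
def pvS (vrstica : List (Int × Int × Int)) : List Int :=
  (vrstica.zip (vrstica.drop 1)).foldl
    (fun S p => S ++ [S.getLast?.getD 0 + razdalja p.1 p.2]) [0]

def pvG (vrstica : List (Int × Int × Int)) (i : Nat) : Int :=
  (pvS vrstica).getD (min (i + 1) (vrstica.length - 1)) 0 -
  (pvS vrstica).getD (max (i - 1) 0) 0

-- getD of B's prefix-sum table
lemma pv_S_getD (vrstica : List (Int × Int × Int)) (k : Nat) (hk : k < vrstica.length) :
    (pvS vrstica).getD k 0 = pvPre vrstica k := by
  unfold pvS
  have hz : (vrstica.zip (vrstica.drop 1)).length = vrstica.length - 1 := by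
    rw [List.length_zip, List.length_drop]; omega
  rw [pv_fold_S, hz]
  have hk' : k < vrstica.length - 1 + 1 := by omega
  simp only [List.getD, List.getElem?_map, List.getElem?_range, hk', if_pos]
  simp only [Option.map_some, Option.getD_some]
  exact pv_take_sum vrstica k (by omega)

lemma pv_getD_map_range (g : Nat → Int) (m k : Nat) (h : k < m) :
    ((List.range m).map g).getD k 0 = g k := by
  simp [List.getD, List.getElem?_map, List.getElem?_range, h]

lemma pv_pre_succ (vrstica : List (Int × Int × Int)) (k : Nat) (hk : 1 ≤ k) :
    pvPre vrstica k = pvPre vrstica (k - 1) + pvDist vrstica (k - 1) := by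
  obtain ⟨m, rfl⟩ : ∃ m, k = m + 1 := ⟨k - 1, by omega⟩
  simp [pvPre]

lemma pv_a_length (vrstica : List (Int × Int × Int)) :
    (energije_vrstice vrstica).length = vrstica.length := by
  rw [pv_A_eq]
  simp [pv_len_fold]

lemma pv_alt_length (vrstica : List (Int × Int × Int)) :
    (energije_vrstice_alt vrstica).length = vrstica.length := by
  simp [energije_vrstice_alt]

lemma pv_B_eq (vrstica : List (Int × Int × Int)) :
    energije_vrstice_alt vrstica =
      (((List.range vrstica.length).map (pvG vrstica)).set 0
          (((List.range vrstica.length).map (pvG vrstica)).getD 0 0 * 2)).set (vrstica.length - 1)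
        ((((List.range vrstica.length).map (pvG vrstica)).set 0
          (((List.range vrstica.length).map (pvG vrstica)).getD 0 0 * 2)).getD (vrstica.length - 1) 0 * 2) := rfl

lemma pv_G_val (vrstica : List (Int × Int × Int)) (j : Nat) (hj : j < vrstica.length) :
    pvG vrstica j = pvPre vrstica (min (j + 1) (vrstica.length - 1)) - pvPre vrstica (j - 1) := by
  unfold pvG
  have h2 : max (j - 1) 0 = j - 1 := by omega
  rw [h2, pv_S_getD vrstica _ (by omega), pv_S_getD vrstica _ (by omega)]

theorem energije_vrstice_spec : Claim_equal_energije_vrstice := by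
  intro vrstica _ hpre
  unfold Spec_energije_vrstice
  have hn : 0 < vrstica.length := List.length_pos_iff.mpr hpre
  set n := vrstica.length with hn_def
  have hinv := pv_acc_invariant vrstica (n - 1) (le_refl _)
  have hlenF := pv_len_fold vrstica (n - 1)
  apply List.ext_getElem
  · rw [pv_a_length, pv_alt_length]
  · intro j hj hj'
    have hjn : j < n := by rwa [pv_a_length] at hj
    have hgdA : (energije_vrstice vrstica).getD j 0 = (energije_vrstice vrstica)[j]'hj := by
      simp [List.getD, List.getElem?_eq_getElem hj]
    have hgdB : (energije_vrstice_alt vrstica).getD j 0 = (energije_vrstice_alt vrstica)[j]'hj' := by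
      simp [List.getD, List.getElem?_eq_getElem hj']
    rw [← hgdA, ← hgdB, pv_A_eq, pv_B_eq]
    have hF2 : ∀ m, ((pvFold vrstica (n - 1)).set 0
        ((pvFold vrstica (n - 1)).getD 0 0 * 2)).getD m 0 =
        if m = 0 ∧ 0 < n then pvAcc vrstica (n - 1) 0 * 2
        else pvAcc vrstica (n - 1) m := by
      intro m
      rw [pv_getD_set, hlenF, hinv 0, hinv m]
    have hBlen : ((List.range n).map (pvG vrstica)).length = n := by simp
    have hB2 : ∀ m, (((List.range n).map (pvG vrstica)).set 0
        (((List.range n).map (pvG vrstica)).getD 0 0 * 2)).getD m 0 =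
        if m = 0 ∧ 0 < n then pvG vrstica 0 * 2
        else ((List.range n).map (pvG vrstica)).getD m 0 := by
      intro m
      rw [pv_getD_set, hBlen, pv_getD_map_range (pvG vrstica) n 0 hn]
    rw [pv_getD_set, List.length_set, hlenF, hF2 j, hF2 (n - 1),
        pv_getD_set, List.length_set, hBlen, hB2 j, hB2 (n - 1)]
    by_cases h0 : j = 0
    · subst h0
      by_cases hlast : (0 : Nat) = n - 1
      · rw [if_pos ⟨hlast, by omega⟩, if_pos ⟨hlast.symm, hn⟩,
            if_pos ⟨hlast, by omega⟩, if_pos ⟨hlast.symm, hn⟩]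
        have hn1 : n = 1 := by omega
        rw [pv_G_val vrstica 0 hn, hn1]
        have hv1 : vrstica.length = 1 := by omega
        rw [hv1]
        simp [pvAcc, pvPre]
      · rw [if_neg (by omega), if_pos ⟨rfl, hn⟩, if_neg (by omega), if_pos ⟨rfl, hn⟩]
        rw [pv_G_val vrstica 0 hn]
        have hmin : min (0 + 1) (n - 1) = 1 := by omega
        rw [hmin]
        simp only [pvAcc, pvPre]
        split_ifs <;> (try omega) <;> ring
    · by_cases hlast : j = n - 1
      · subst hlast
        rw [if_pos ⟨rfl, by omega⟩, if_neg (by omega),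
            if_pos ⟨rfl, by omega⟩, if_neg (by omega)]
        rw [pv_getD_map_range (pvG vrstica) n (n - 1) (by omega),
            pv_G_val vrstica (n - 1) (by omega)]
        have hmin : min (n - 1 + 1) (n - 1) = n - 1 := by omega
        rw [hmin, pv_pre_succ vrstica (n - 1) (by omega)]
        simp only [pvAcc]
        split_ifs <;> (try omega) <;> ring
      · rw [if_neg (by omega), if_neg (by omega), if_neg (by omega), if_neg (by omega)]
        rw [pv_getD_map_range (pvG vrstica) n j hjn, pv_G_val vrstica j hjn]
        have hmin : min (j + 1) (n - 1) = j + 1 := by omega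
        rw [hmin, show pvPre vrstica (j + 1) = pvPre vrstica j + pvDist vrstica j from rfl,
            pv_pre_succ vrstica j (by omega)]
        simp only [pvAcc]
        split_ifs <;> (try omega) <;> ring
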